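-- pv_equiv track=rewrite | github.com/strepetea/podzial-to-gc | entries_fetcher.py | find_subs_end
-- ===== SOURCE A (Python) =====
-- def find_subs_end(string: str, subs: str, idx: int = 0) -> int:
--     """
--     Finds the index of a character in the string IMMEDIATELY after the subs.
--
--     Args:
--         string (str): A string to be analyzed
--
--         subs (str): A substring the string is to be analyzed for
--
--         idx (int, optional): An integer representing the index of
--         the substring's (idx+1)th occurence in the string. Defaults to 0.
--
--     Returns:
--         int: An index of a character immediately after the substring.
--     """
--     idx += 1
--     if idx > count_substrings(string, subs):
--         return -1
--
--     count = 0
--     subs_end = 0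
--
--     while count < idx:
--         found_index = string.find(subs, subs_end)
--
--         if found_index == -1:
--             return -1
--
--         count += 1
--         subs_end = found_index + len(subs)
--
--     return subs_end
--
-- def count_substrings(string: str, subs: str) -> int:
--     """
--     Counts occurences of the substring in the string.
--
--     Args:
--         string(str): A string to be analyzed
--
--         subs(str): A substring the td_str is to be analyzed for
--
--     Returns:
--         int: The amount of the substrings in the td_str.
--     """
--     count = 0
--     start = 0
--
--     while True:
--         found_index = string.find(subs, start)
--
--         if found_index == -1:
--             break
--
--         count += 1
--         start = found_index + len(subs)
--
--     return count
-- ===== SOURCE B (Python) =====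
-- def find_subs_end(string: str, subs: str, idx: int = 0) -> int:
--     """Index just after the (idx+1)th non-overlapping occurrence of subs, or -1."""
--     n = max(idx + 1, 0)  # how many occurrences to consume; never negative
--     parts = string.split(subs)
--     if n > len(parts) - 1:
--         return -1
--     return n * len(subs) + sum(len(p) for p in parts[:n])
-- ===== Notes on version B (the rewrite author's own statement) =====
-- stated objective: simpler
-- what changed: B replaces A's helper count_substrings and its re-scanning find-loop with one string.split(subs) call, deriving the answer arithmetically as n*len(subs) plus the lengths of the first n split parts (n = max(idx+1,0) occurrences consumed); Pre_ excludes only subs == '', where A loops forever and split('') raises ValueError.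
import Mathlib
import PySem

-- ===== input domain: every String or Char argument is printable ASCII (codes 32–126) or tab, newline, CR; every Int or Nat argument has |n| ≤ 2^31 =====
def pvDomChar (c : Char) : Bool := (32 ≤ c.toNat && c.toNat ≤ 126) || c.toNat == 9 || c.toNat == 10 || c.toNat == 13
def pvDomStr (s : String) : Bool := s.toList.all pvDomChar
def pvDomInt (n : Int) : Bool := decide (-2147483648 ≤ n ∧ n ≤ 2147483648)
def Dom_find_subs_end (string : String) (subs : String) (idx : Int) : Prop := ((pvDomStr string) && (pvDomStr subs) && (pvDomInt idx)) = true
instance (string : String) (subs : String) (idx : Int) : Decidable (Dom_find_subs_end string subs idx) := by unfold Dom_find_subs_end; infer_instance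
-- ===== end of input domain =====

-- B replaces A's count_substrings helper and re-scanning find-loop by a single string.split(subs)
-- call plus arithmetic on the split parts (objective: simpler).

-- ===== PORT A =====
-- the 'while True' loop of count_substrings; the fuel (string length + 1) only makes the
-- loop total: for subs ≠ "" (Pre_) it is never exhausted; for subs = "" the Python loops forever.
def pvCountLoop (s sub : List Char) : Nat → Int → Int → Int
  | 0, _, count => count
  | fuel+1, start, count =>
    let found_index := PySem.Chars.findFrom s sub start none
    if found_index = -1 then count
    else pvCountLoop s sub fuel (found_index + (sub.length : Int)) (count + 1)

def count_substrings (string : String) (subs : String) : Int :=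
  pvCountLoop string.toList subs.toList (string.toList.length + 1) 0 0

-- the 'while count < idx' loop of find_subs_end; same fuel remark as above.
def pvWhileLoop (s sub : List Char) : Nat → Int → Int → Int → Int
  | 0, _, _, subs_end => subs_end
  | fuel+1, count, idx, subs_end =>
    if count < idx then
      let found_index := PySem.Chars.findFrom s sub subs_end none
      if found_index = -1 then -1
      else pvWhileLoop s sub fuel (count + 1) idx (found_index + (sub.length : Int))
    else subs_end

def find_subs_end (string : String) (subs : String) (idx : Int) : Int :=
  let idx1 := idx + 1
  if idx1 > count_substrings string subs then -1
  else pvWhileLoop string.toList subs.toList (string.toList.length + 1) 0 idx1 0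

-- ===== PORT B =====
def find_subs_end_alt (string : String) (subs : String) (idx : Int) : Int :=
  let n := max (idx + 1) 0
  match PySem.Str.split? string subs with
  | none => -1   -- unreachable under Pre_ (subs ≠ ""): Python's split raises ValueError
  | some parts =>
    if n > (parts.length : Int) - 1 then -1
    else n * PySem.Str.len subs
         + ((PySem.List.slice parts none (some n)).map (fun p => PySem.Str.len p)).sum

-- ===== PRECONDITION & SPEC =====
-- Pre_ excludes only subs = "": there A's count_substrings loops forever (A never returns),
-- and B's string.split("") raises ValueError.
def Pre_find_subs_end (string : String) (subs : String) (idx : Int) : Prop := subs ≠ ""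
instance (string : String) (subs : String) (idx : Int) : Decidable (Pre_find_subs_end string subs idx) := by unfold Pre_find_subs_end; infer_instance

def pvWitness_find_subs_end : String × String × Int := ("abcabca", "bc", 1)

def Spec_find_subs_end (string : String) (subs : String) (idx : Int) (out : Int) : Prop := out = find_subs_end_alt string subs idx
instance (string : String) (subs : String) (idx : Int) (out : Int) : Decidable (Spec_find_subs_end string subs idx out) := by unfold Spec_find_subs_end; infer_instance

-- ===== CLAIM (what is proved, stated in full; the proofs are below) =====
def Claim_equal_find_subs_end : Prop := ∀ (string : String) (subs : String) (idx : Int), Dom_find_subs_end string subs idx → Pre_find_subs_end string subs idx → Spec_find_subs_end string subs idx (find_subs_end string subs idx)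

-- ===== LEMMAS AND PROOFS =====

-- unfolding equations of split's scanner (definitional)
theorem pv_go_zero (sep l cur acc) : PySem.Chars.splitOn.go sep 0 l cur acc = ((cur.reverse ++ l) :: acc).reverse := rfl
theorem pv_go_nil (sep f cur acc) : PySem.Chars.splitOn.go sep (f+1) [] cur acc = (cur.reverse :: acc).reverse := rfl
theorem pv_go_cons (sep f c rest cur acc) : PySem.Chars.splitOn.go sep (f+1) (c::rest) cur acc =
    if sep.isPrefixOf (c::rest) then PySem.Chars.splitOn.go sep f ((c::rest).drop sep.length) [] (cur.reverse::acc)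
    else PySem.Chars.splitOn.go sep f rest (c::cur) acc := rfl

theorem pv_find_nil (sep : List Char) (h : sep ≠ []) : PySem.Chars.find [] sep = -1 := by
  rw [PySem.Chars.find_eq_neg_one_iff]; simp [h]

-- find l sep = 0 when sep is a prefix of l
theorem pv_find_prefix_zero (l sep : List Char) (h : sep <+: l) :
    PySem.Chars.find l sep = 0 := by
  have hinf : sep <:+: l := h.isInfix
  have h0 : 0 ≤ PySem.Chars.find l sep := (PySem.Chars.find_nonneg_iff l sep).2 hinf
  have hs := PySem.Chars.find_spec (s := l) (sub := sep) h0
  by_contra hne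
  have : (0:Nat) < (PySem.Chars.find l sep).toNat := by omega
  have := hs.2 0 this
  simp at this
  exact this h

-- stepping over one non-matching character shifts find by one
theorem pv_find_cons (c : Char) (rest sep : List Char) (hnp : ¬ sep <+: (c :: rest)) :
    PySem.Chars.find (c :: rest) sep =
      if PySem.Chars.find rest sep = -1 then -1 else 1 + PySem.Chars.find rest sep := by
  have hdrop : ∀ i : Nat, (c :: rest).drop (i+1) = rest.drop i := by intro i; simp
  split
  · next hm1 =>
    rw [PySem.Chars.find_eq_neg_one_iff] at hm1 ⊢
    intro hinf
    have hex : ∃ j, sep <+: (c :: rest).drop j := by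
      rw [PySem.Chars.exists_prefix_drop_iff_isIn, PySem.Chars.isIn_iff_infix]
      exact hinf
    rcases hex with ⟨j, hj⟩
    cases j with
    | zero => exact hnp (by simpa using hj)
    | succ i =>
      apply hm1
      rw [← PySem.Chars.isIn_iff_infix, ← PySem.Chars.exists_prefix_drop_iff_isIn]
      exact ⟨i, by rw [← hdrop i]; exact hj⟩
  · next hm1 =>
    have h0 : 0 ≤ PySem.Chars.find rest sep := by
      have := PySem.Chars.neg_one_le_find (s := rest) (sub := sep)
      omega
    have hsr := PySem.Chars.find_spec (s := rest) (sub := sep) h0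
    have hinf : sep <:+: (c :: rest) := by
      rw [← PySem.Chars.isIn_iff_infix, ← PySem.Chars.exists_prefix_drop_iff_isIn]
      exact ⟨(PySem.Chars.find rest sep).toNat + 1, by rw [hdrop]; exact hsr.1⟩
    have h0' : 0 ≤ PySem.Chars.find (c :: rest) sep := (PySem.Chars.find_nonneg_iff _ _).2 hinf
    have hsl := PySem.Chars.find_spec (s := c :: rest) (sub := sep) h0'
    set g := (PySem.Chars.find (c :: rest) sep).toNat with hg
    have hgpos : 0 < g := by
      rcases Nat.eq_zero_or_pos g with h | h
      · exfalso; apply hnp; have := hsl.1; rw [h] at this; simpa using this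
      · exact h
    have hfr : (PySem.Chars.find rest sep).toNat = g - 1 := by
      by_contra hne
      rcases Nat.lt_or_ge (PySem.Chars.find rest sep).toNat (g-1) with hlt | hge
      · have := hsl.2 ((PySem.Chars.find rest sep).toNat + 1) (by omega)
        rw [hdrop] at this
        exact this hsr.1
      · have hlt2 : g - 1 < (PySem.Chars.find rest sep).toNat := by omega
        have := hsr.2 (g-1) hlt2
        rw [← hdrop (g-1)] at this
        have heq : g - 1 + 1 = g := by omega
        rw [heq] at this
        exact this hsl.1
    omega

-- invariant of split's accumulator scanner, phrased through find
theorem pv_go_spec (sep : List Char) (hsep : sep ≠ []) :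
    ∀ (N : Nat) (l : List Char), l.length ≤ N → ∀ (fuel : Nat) (cur : List Char) (acc : List (List Char)),
      l.length ≤ fuel →
      PySem.Chars.splitOn.go sep fuel l cur acc =
        acc.reverse ++
        (if PySem.Chars.find l sep = -1 then [cur.reverse ++ l]
         else (cur.reverse ++ l.take (PySem.Chars.find l sep).toNat) ::
              PySem.Chars.splitOn (l.drop ((PySem.Chars.find l sep).toNat + sep.length)) sep) := by
  intro N
  induction N with
  | zero =>
    intro l hl fuel cur acc hf
    have : l = [] := List.eq_nil_of_length_eq_zero (by omega)
    subst this
    rw [pv_find_nil sep hsep]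
    cases fuel with
    | zero => rw [pv_go_zero]; simp
    | succ f => rw [pv_go_nil]; simp
  | succ N ih =>
    intro l hl fuel cur acc hf
    cases l with
    | nil =>
      rw [pv_find_nil sep hsep]
      cases fuel with
      | zero => rw [pv_go_zero]; simp
      | succ f => rw [pv_go_nil]; simp
    | cons c rest =>
      cases fuel with
      | zero => simp at hf
      | succ f =>
        rw [pv_go_cons]
        by_cases hp : sep.isPrefixOf (c::rest)
        · rw [if_pos hp]
          rw [List.isPrefixOf_iff_prefix] at hp
          have hfind : PySem.Chars.find (c::rest) sep = 0 := pv_find_prefix_zero _ _ hp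
          have hslen : 1 ≤ sep.length := by cases sep; simp at hsep; simp
          set X := List.drop sep.length (c :: rest) with hX
          have hXlen : X.length ≤ N := by
            rw [hX, List.length_drop]; simp at hl; simp; omega
          have hXf : X.length ≤ f := by
            rw [hX, List.length_drop]; simp at hf; simp; omega
          rw [ih X hXlen f [] (cur.reverse::acc) hXf]
          have hsplit : PySem.Chars.splitOn X sep =
              (if PySem.Chars.find X sep = -1 then [X]
               else X.take (PySem.Chars.find X sep).toNat ::
                    PySem.Chars.splitOn (X.drop ((PySem.Chars.find X sep).toNat + sep.length)) sep) := by
            have h2 := ih X hXlen (X.length + 1) [] [] (by omega)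
            simp only [List.reverse_nil, List.nil_append] at h2
            exact h2
          rw [hfind]
          simp only [Int.toNat_zero, List.take_zero, List.append_nil, Nat.zero_add,
            if_neg (by norm_num : ¬ (0:Int) = -1)]
          simp only [List.reverse_nil, List.nil_append]
          rw [← hsplit, hX]
          simp
        · rw [if_neg hp]
          rw [List.isPrefixOf_iff_prefix] at hp
          have hlen : rest.length ≤ N := by simp at hl; omega
          rw [ih _ hlen f (c::cur) acc (by simp at hf; omega)]
          rw [pv_find_cons c rest sep hp]
          by_cases hm : PySem.Chars.find rest sep = -1
          · rw [if_pos hm, if_pos hm]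
            simp
          · rw [if_neg hm]
            have h0 : 0 ≤ PySem.Chars.find rest sep := by
              have := PySem.Chars.neg_one_le_find (s := rest) (sub := sep)
              omega
            rw [if_neg (by omega), if_neg (by omega)]
            have htn : (1 + PySem.Chars.find rest sep).toNat = (PySem.Chars.find rest sep).toNat + 1 := by omega
            rw [htn]
            rw [show (PySem.Chars.find rest sep).toNat + 1 + sep.length
                  = ((PySem.Chars.find rest sep).toNat + sep.length) + 1 from by omega]
            rw [List.drop_succ_cons]
            simp

-- the one-step unfolding of Python's split (sep ≠ "") in terms of find
theorem pv_splitOn_unfold (l sep : List Char) (hsep : sep ≠ []) :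
    PySem.Chars.splitOn l sep =
      if PySem.Chars.find l sep = -1 then [l]
      else l.take (PySem.Chars.find l sep).toNat ::
           PySem.Chars.splitOn (l.drop ((PySem.Chars.find l sep).toNat + sep.length)) sep := by
  have := pv_go_spec sep hsep l.length l le_rfl (l.length + 1) [] [] (by omega)
  simpa only [List.reverse_nil, List.nil_append] using this

theorem pv_splitOn_ne_nil (l sep : List Char) (hsep : sep ≠ []) :
    PySem.Chars.splitOn l sep ≠ [] := by
  rw [pv_splitOn_unfold l sep hsep]; split <;> simp

-- one successful find step, packaged for both loop proofs
theorem pv_step (s sub : List Char) (hsub : sub ≠ []) (k : Nat) (hk : k ≤ s.length)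
    (hm : ¬ PySem.Chars.find (s.drop k) sub = -1) :
    0 ≤ PySem.Chars.find (s.drop k) sub ∧
    (PySem.Chars.find (s.drop k) sub).toNat + sub.length ≤ s.length - k ∧
    1 ≤ sub.length ∧
    PySem.Chars.splitOn (s.drop k) sub =
      (s.drop k).take (PySem.Chars.find (s.drop k) sub).toNat ::
      PySem.Chars.splitOn (s.drop (k + ((PySem.Chars.find (s.drop k) sub).toNat + sub.length))) sub := by
  have h0 : 0 ≤ PySem.Chars.find (s.drop k) sub := by
    have := PySem.Chars.neg_one_le_find (s := s.drop k) (sub := sub)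
    omega
  have hslen : 1 ≤ sub.length := by cases sub; simp at hsub; simp
  have hspec := (PySem.Chars.find_spec (s := s.drop k) (sub := sub) h0).1
  have hlen : (PySem.Chars.find (s.drop k) sub).toNat + sub.length ≤ s.length - k := by
    have hle := hspec.length_le
    simp [List.length_drop] at hle
    have hfl := PySem.Chars.find_le_length (s := s.drop k) (sub := sub)
    simp [List.length_drop] at hfl
    omega
  refine ⟨h0, hlen, hslen, ?_⟩
  rw [pv_splitOn_unfold _ _ hsub, if_neg hm, List.drop_drop]

-- A's counting loop counts the split parts
theorem pv_countLoop_spec (s sub : List Char) (hsub : sub ≠ []) :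
    ∀ (fuel : Nat) (k : Nat) (c : Int), k ≤ s.length → s.length - k < fuel →
      pvCountLoop s sub fuel (k : Int) c
        = c + ((PySem.Chars.splitOn (s.drop k) sub).length : Int) - 1 := by
  intro fuel
  induction fuel with
  | zero => intro k c hk hf; omega
  | succ f ih =>
    intro k c hk hf
    simp only [pvCountLoop]
    rw [PySem.Chars.findFrom_natCast s sub k hk]
    by_cases hm : PySem.Chars.find (s.drop k) sub = -1
    · rw [if_pos hm, if_pos rfl]
      rw [pv_splitOn_unfold _ _ hsub, if_pos hm]
      simp
    · obtain ⟨h0, hlen, hslen, hsplit⟩ := pv_step s sub hsub k hk hm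
      rw [if_neg hm]
      rw [if_neg (by omega)]
      have hcast : (k : Int) + PySem.Chars.find (s.drop k) sub + (sub.length : Int)
          = ((k + ((PySem.Chars.find (s.drop k) sub).toNat + sub.length) : Nat) : Int) := by
        push_cast; omega
      rw [hcast, ih _ (c+1) (by omega) (by omega)]
      rw [hsplit]
      simp only [List.length_cons]
      push_cast
      ring

-- A's while loop computes B's arithmetic formula
theorem pv_whileLoop_spec (s sub : List Char) (hsub : sub ≠ []) :
    ∀ (fuel : Nat) (k : Nat) (cnt n : Int), k ≤ s.length → s.length - k < fuel →
      cnt ≤ n → n - cnt ≤ ((PySem.Chars.splitOn (s.drop k) sub).length : Int) - 1 →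
      pvWhileLoop s sub fuel cnt n (k : Int)
        = (k : Int) + (n - cnt) * (sub.length : Int)
          + (((PySem.Chars.splitOn (s.drop k) sub).take (n - cnt).toNat).map
              (fun p => (p.length : Int))).sum := by
  intro fuel
  induction fuel with
  | zero => intro k cnt n hk hf _ _; omega
  | succ f ih =>
    intro k cnt n hk hf hcn hbound
    simp only [pvWhileLoop]
    by_cases hlt : cnt < n
    · rw [if_pos hlt]
      rw [PySem.Chars.findFrom_natCast s sub k hk]
      have hm : ¬ PySem.Chars.find (s.drop k) sub = -1 := by
        intro hm1
        rw [pv_splitOn_unfold _ _ hsub, if_pos hm1] at hbound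
        simp at hbound
        omega
      obtain ⟨h0, hlen, hslen, hsplit⟩ := pv_step s sub hsub k hk hm
      rw [if_neg hm, if_neg (by omega)]
      have hcast : (k : Int) + PySem.Chars.find (s.drop k) sub + (sub.length : Int)
          = ((k + ((PySem.Chars.find (s.drop k) sub).toNat + sub.length) : Nat) : Int) := by
        push_cast; omega
      have hlen' : n - (cnt + 1)
          ≤ ((PySem.Chars.splitOn (s.drop (k + ((PySem.Chars.find (s.drop k) sub).toNat + sub.length))) sub).length : Int) - 1 := by
        rw [hsplit] at hbound
        simp only [List.length_cons] at hbound
        push_cast at hbound ⊢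
        omega
      rw [hcast, ih _ (cnt + 1) n (by omega) (by omega) (by omega) hlen']
      rw [hsplit]
      have htn : (n - cnt).toNat = (n - (cnt + 1)).toNat + 1 := by omega
      rw [htn, List.take_succ_cons, List.map_cons, List.sum_cons]
      have hp0 : ((s.drop k).take (PySem.Chars.find (s.drop k) sub).toNat).length
          = (PySem.Chars.find (s.drop k) sub).toNat := by
        rw [List.length_take]
        simp [List.length_drop]
        omega
      rw [hp0]
      push_cast
      have hFtn : ((PySem.Chars.find (s.drop k) sub).toNat : Int) = PySem.Chars.find (s.drop k) sub := by omega
      rw [hFtn]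
      ring
    · rw [if_neg hlt]
      have hz : n - cnt = 0 := by omega
      rw [hz]
      simp

-- splitting helper facts shared by the main proofs
theorem pv_count_eq (string subs : String) (hsub : subs.toList ≠ []) :
    count_substrings string subs
      = ((PySem.Chars.splitOn string.toList subs.toList).length : Int) - 1 := by
  have := pv_countLoop_spec string.toList subs.toList hsub (string.toList.length + 1) 0 0 (by omega) (by omega)
  simpa [count_substrings] using this

theorem pv_split?_eq (string subs : String) (hsub : subs.toList ≠ []) :
    PySem.Str.split? string subs
      = some ((PySem.Chars.splitOn string.toList subs.toList).map String.ofList) := by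
  simp only [PySem.Str.split?, PySem.Chars.split?, List.isEmpty_iff]
  rw [if_neg hsub]
  simp only [Option.map_some]

-- the two ports agree for subs ≠ ""
theorem pv_main (string subs : String) (idx : Int) (hsub : subs ≠ "") :
    find_subs_end string subs idx = find_subs_end_alt string subs idx := by
  have hsubl : subs.toList ≠ [] := by simpa using hsub
  set s := string.toList with hs
  set sb := subs.toList with hsb
  have hL1 : 1 ≤ (PySem.Chars.splitOn s sb).length :=
    List.length_pos_of_ne_nil (pv_splitOn_ne_nil s sb hsubl)
  have hcount := pv_count_eq string subs hsubl
  rw [← hs, ← hsb] at hcount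
  unfold find_subs_end find_subs_end_alt
  simp only [pv_split?_eq string subs hsubl]
  rw [← hs, ← hsb]
  by_cases h0 : idx + 1 ≤ 0
  · -- A's while loop never runs and returns 0; B consumes max(idx+1,0) = 0 occurrences
    rw [if_neg (by rw [hcount]; omega)]
    have hmax : max (idx + 1) 0 = 0 := by omega
    rw [hmax, if_neg (by rw [List.length_map]; omega)]
    simp only [pvWhileLoop]
    rw [if_neg (by omega)]
    rw [PySem.List.slice_to _ le_rfl]
    simp
  · have hmax : max (idx + 1) 0 = idx + 1 := by omega
    rw [hmax]
    set n := idx + 1 with hn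
    by_cases h2 : n > ((PySem.Chars.splitOn s sb).length : Int) - 1
    · rw [if_pos (by rw [hcount]; omega)]
      rw [if_pos (by rw [List.length_map]; omega)]
    · rw [if_neg (by rw [hcount]; omega), if_neg (by rw [List.length_map]; omega)]
      have hw := pv_whileLoop_spec s sb hsubl (s.length + 1) 0 0 n (by omega) (by omega) (by omega) (by simpa using h2)
      simp only [Nat.cast_zero] at hw
      rw [hw]
      simp only [sub_zero, zero_add, List.drop_zero]
      rw [PySem.List.slice_to _ (by omega), ← List.map_take, List.map_map]
      have hcomp : ((fun p => PySem.Str.len p) ∘ String.ofList)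
          = (fun p : List Char => (p.length : Int)) := by
        funext p; simp [PySem.Str.len]
      rw [hcomp]
      have hlen2 : PySem.Str.len subs = (sb.length : Int) := by simp [PySem.Str.len, hsb]
      rw [hlen2]

-- ===== VERDICT (by name: the statement is the Claim_ definition above) =====
theorem find_subs_end_spec : Claim_equal_find_subs_end := by
  intro string subs idx _ hpre
  unfold Pre_find_subs_end at hpre
  exact pv_main string subs idx hpre
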